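-- pv_equiv track=rewrite | github.com/corepunch/orca | tools/pyphp/pyphp.py | _tokenize_php_code
-- ===== SOURCE A (Python) =====
-- def _tokenize_php_code(code):
--     """Yield ``(kind, value)`` tokens from a PHP code string.
--
--     Token kinds: ``STRING_DQ``, ``STRING_SQ``, ``COMMENT``,
--     ``OPEN`` (``{``), ``CLOSE`` (``}``), ``SEMI`` (``;``), ``NL``, ``OTHER``.
--     """
--     i = 0
--     while i < len(code):
--         ch = code[i]
--         if ch == '"':
--             j = i + 1
--             while j < len(code) and code[j] != '"':
--                 if code[j] == '\\':
--                     j += 1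
--                 j += 1
--             yield ('STRING_DQ', code[i:j + 1])
--             i = j + 1
--         elif ch == "'":
--             j = i + 1
--             while j < len(code) and code[j] != "'":
--                 if code[j] == '\\':
--                     j += 1
--                 j += 1
--             yield ('STRING_SQ', code[i:j + 1])
--             i = j + 1
--         elif code[i:i + 2] == '//':
--             j = code.find('\n', i)
--             j = j if j != -1 else len(code)
--             yield ('COMMENT', code[i:j])
--             i = j
--         elif ch == '{':
--             yield ('OPEN', ch);   i += 1
--         elif ch == '}':
--             yield ('CLOSE', ch);  i += 1
--         elif ch == ';':
--             yield ('SEMI', ch);   i += 1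
--         elif ch == '\n':
--             yield ('NL', ch);     i += 1
--         else:
--             yield ('OTHER', ch);  i += 1
-- ===== SOURCE B (Python) =====
-- def _tokenize_php_code(code):
--     """Yield ``(kind, value)`` tokens from a PHP code string.
--
--     Re-implementation: instead of walking strings character by character,
--     closing quotes are located with ``str.find`` plus a backslash-parity
--     check, and single-character tokens are classified via a dict.
--     """
--     kinds = {'{': 'OPEN', '}': 'CLOSE', ';': 'SEMI', '\n': 'NL'}
--     n = len(code)
--     i = 0
--     while i < n:
--         ch = code[i]
--         if ch == '"' or ch == "'":
--             j = _close_quote(code, i)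
--             yield ('STRING_DQ' if ch == '"' else 'STRING_SQ', code[i:j])
--             i = j
--         elif code[i:i + 2] == '//':
--             j = code.find('\n', i)
--             if j == -1:
--                 j = n
--             yield ('COMMENT', code[i:j])
--             i = j
--         else:
--             yield (kinds.get(ch, 'OTHER'), ch)
--             i += 1
--
--
-- def _close_quote(code, i):
--     """Index just past the quote closing ``code[i]`` (len(code) if none):
--     the first same quote after ``i`` preceded by an even run of backslashes."""
--     q = code[i]
--     k = code.find(q, i + 1)
--     while k != -1:
--         b = k - 1
--         while b > i and code[b] == '\\':
--             b -= 1
--         if (k - 1 - b) % 2 == 0: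
--             return k + 1
--         k = code.find(q, k + 1)
--     return len(code)
-- ===== Notes on version B (the rewrite author's own statement) =====
-- stated objective: alternative
-- what changed: Closing quotes are located with str.find plus an even-backslash-run parity check (instead of A's char-by-char escape-skipping scan), and single-character tokens are classified through a dict lookup instead of A's if/elif chain.
import Mathlib
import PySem

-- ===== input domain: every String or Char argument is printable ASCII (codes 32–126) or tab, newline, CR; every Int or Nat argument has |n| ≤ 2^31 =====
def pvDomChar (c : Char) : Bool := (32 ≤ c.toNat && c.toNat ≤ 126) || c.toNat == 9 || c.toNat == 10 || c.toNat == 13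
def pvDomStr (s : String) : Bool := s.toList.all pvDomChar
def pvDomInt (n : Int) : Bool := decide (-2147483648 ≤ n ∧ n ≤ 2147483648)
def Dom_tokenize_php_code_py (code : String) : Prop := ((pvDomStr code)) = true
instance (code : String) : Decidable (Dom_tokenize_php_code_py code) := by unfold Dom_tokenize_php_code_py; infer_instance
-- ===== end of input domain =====

-- B re-implements the tokenizer: closing quotes are located with str.find plus a
-- backslash-parity check (instead of A's char-by-char escape-skipping scan) and
-- single-char tokens are classified through a dict (objective: alternative, same O(n)).
-- Loops are ported as structural recursion on a fuel argument (cs.length is always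
-- enough fuel, since every iteration advances the index): a pure totality guard.

-- code[a:b] for nonnegative indices (slice helper shared by both ports)
def pvSlice (cs : List Char) (a b : Nat) : List Char :=
  PySem.List.slice cs (some (a : Int)) (some (b : Int))

-- ===== PORT A =====
-- inner while of A: `while j < len(code) and code[j] != q: if code[j]=='\\': j += 1; j += 1`
def pvStrScanA (cs : List Char) (q : Char) : Nat → Nat → Nat
  | 0, j => j
  | fuel + 1, j =>
    if h : j < cs.length then
      if cs[j] = q then j
      else if cs[j] = '\\' then pvStrScanA cs q fuel (j + 2)
      else pvStrScanA cs q fuel (j + 1)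
    else j

-- A's `j = code.find('\n', i); j = j if j != -1 else len(code)`
def pvFindNlA (cs : List Char) (i : Nat) : Nat :=
  if PySem.Chars.findFrom cs ['\n'] (i : Int) ≠ -1
  then (PySem.Chars.findFrom cs ['\n'] (i : Int)).toNat else cs.length

-- the main loop of A (`while i < len(code): …`, one cons per yield)
def pvLoopA (cs : List Char) : Nat → Nat → List (String × String)
  | 0, _ => []
  | fuel + 1, i =>
    if h : i < cs.length then
      if cs[i] = '"' then
        ("STRING_DQ", String.ofList (pvSlice cs i (pvStrScanA cs '"' cs.length (i + 1) + 1))) ::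
          pvLoopA cs fuel (pvStrScanA cs '"' cs.length (i + 1) + 1)
      else if cs[i] = '\'' then
        ("STRING_SQ", String.ofList (pvSlice cs i (pvStrScanA cs '\'' cs.length (i + 1) + 1))) ::
          pvLoopA cs fuel (pvStrScanA cs '\'' cs.length (i + 1) + 1)
      else if hc : pvSlice cs i (i + 2) = ['/', '/'] then
        ("COMMENT", String.ofList (pvSlice cs i (pvFindNlA cs i))) :: pvLoopA cs fuel (pvFindNlA cs i)
      else if cs[i] = '{' then ("OPEN", String.ofList [cs[i]]) :: pvLoopA cs fuel (i + 1)
      else if cs[i] = '}' then ("CLOSE", String.ofList [cs[i]]) :: pvLoopA cs fuel (i + 1)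
      else if cs[i] = ';' then ("SEMI", String.ofList [cs[i]]) :: pvLoopA cs fuel (i + 1)
      else if cs[i] = '\n' then ("NL", String.ofList [cs[i]]) :: pvLoopA cs fuel (i + 1)
      else ("OTHER", String.ofList [cs[i]]) :: pvLoopA cs fuel (i + 1)
    else []

def tokenize_php_code_py (code : String) : List (String × String) :=
  pvLoopA code.toList code.toList.length 0

-- ===== PORT B =====
-- the dict literal `kinds = {'{': 'OPEN', '}': 'CLOSE', ';': 'SEMI', '\n': 'NL'}`
def pvKindsB : PySem.Dict Char String :=
  ((((PySem.Dict.empty).insert '{' "OPEN").insert '}' "CLOSE").insert ';' "SEMI").insert '\n' "NL"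

-- inner `while b > i and code[b] == '\\': b -= 1` of _close_quote
def pvBackB (cs : List Char) (i : Nat) : Nat → Nat
  | 0 => 0
  | b + 1 => if i < b + 1 ∧ cs.getD (b + 1) ' ' = '\\' then pvBackB cs i b else b + 1

-- outer loop of _close_quote, entered at a found quote position k
def pvFindLoopB (cs : List Char) (q : Char) (i : Nat) : Nat → Nat → Nat
  | 0, _ => cs.length
  | fuel + 1, k =>
    if (k - 1 - pvBackB cs i (k - 1)) % 2 = 0 then k + 1
    else
      if PySem.Chars.findFrom cs [q] ((k : Int) + 1) = -1 then cs.length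
      else pvFindLoopB cs q i fuel (PySem.Chars.findFrom cs [q] ((k : Int) + 1)).toNat

-- `_close_quote(code, i)`: find each candidate quote, accept on even backslash run
def pvCloseQuoteB (cs : List Char) (i : Nat) : Nat :=
  if PySem.Chars.findFrom cs [cs.getD i ' '] ((i : Int) + 1) = -1 then cs.length
  else pvFindLoopB cs (cs.getD i ' ') i cs.length
         (PySem.Chars.findFrom cs [cs.getD i ' '] ((i : Int) + 1)).toNat

-- B's `j = code.find('\n', i); if j == -1: j = n`
def pvFindNlB (cs : List Char) (i : Nat) : Nat :=
  if PySem.Chars.findFrom cs ['\n'] (i : Int) = -1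
  then cs.length else (PySem.Chars.findFrom cs ['\n'] (i : Int)).toNat

-- the main loop of B
def pvLoopB (cs : List Char) : Nat → Nat → List (String × String)
  | 0, _ => []
  | fuel + 1, i =>
    if h : i < cs.length then
      if cs[i] = '"' ∨ cs[i] = '\'' then
        ((if cs[i] = '"' then "STRING_DQ" else "STRING_SQ"),
          String.ofList (pvSlice cs i (pvCloseQuoteB cs i))) :: pvLoopB cs fuel (pvCloseQuoteB cs i)
      else if hc : pvSlice cs i (i + 2) = ['/', '/'] then
        ("COMMENT", String.ofList (pvSlice cs i (pvFindNlB cs i))) :: pvLoopB cs fuel (pvFindNlB cs i)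
      else (PySem.Dict.getD pvKindsB cs[i] "OTHER", String.ofList [cs[i]]) :: pvLoopB cs fuel (i + 1)
    else []

def tokenize_php_code_py_alt (code : String) : List (String × String) :=
  pvLoopB code.toList code.toList.length 0

-- ===== PRECONDITION & SPEC =====
def Spec_tokenize_php_code_py (code : String) (out : List (String × String)) : Prop := out = tokenize_php_code_py_alt code
instance (code : String) (out : List (String × String)) : Decidable (Spec_tokenize_php_code_py code out) := by unfold Spec_tokenize_php_code_py; infer_instance

-- ===== CLAIM (what is proved, stated in full; the proofs are below) =====
def Claim_equal_tokenize_php_code_py : Prop := ∀ (code : String), Dom_tokenize_php_code_py code → Spec_tokenize_php_code_py code (tokenize_php_code_py code)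

-- ===== LEMMAS AND PROOFS =====

-- `[q] <+: cs.drop t` read off as a character equation (support for the find lemmas)
theorem pvSingletonPrefixDrop (cs : List Char) (q : Char) (t : Nat) :
    [q] <+: cs.drop t ↔ t < cs.length ∧ cs.getD t ' ' = q := by
  constructor
  · rintro ⟨l, hl⟩
    have hlen : t < cs.length := by
      have := congrArg List.length hl
      simp [List.length_drop] at this
      omega
    have hget : (cs.drop t).head? = some q := by rw [← hl]; rfl
    rw [List.head?_drop] at hget
    refine ⟨hlen, ?_⟩
    simp [List.getD_eq_getElem?_getD, hget]
  · rintro ⟨hlt, hq⟩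
    refine ⟨cs.drop (t + 1), ?_⟩
    have h2 : cs.drop t = cs[t] :: cs.drop (t + 1) := List.drop_eq_getElem_cons hlt
    rw [h2]
    simp [List.getD_eq_getElem?_getD, List.getElem?_eq_getElem hlt] at hq
    simp [hq]

-- full specification of code.find(q, s) for a single character q and 0 ≤ s ≤ len
theorem pvFindFromSpec (cs : List Char) (q : Char) (s : Nat) (hs : s ≤ cs.length) :
    (PySem.Chars.findFrom cs [q] (s : Int) = -1 →
      ∀ t, s ≤ t → t < cs.length → cs.getD t ' ' ≠ q) ∧
    (PySem.Chars.findFrom cs [q] (s : Int) ≠ -1 →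
      s ≤ (PySem.Chars.findFrom cs [q] (s : Int)).toNat ∧
      (PySem.Chars.findFrom cs [q] (s : Int)).toNat < cs.length ∧
      cs.getD (PySem.Chars.findFrom cs [q] (s : Int)).toNat ' ' = q ∧
        ∀ t, s ≤ t → t < (PySem.Chars.findFrom cs [q] (s : Int)).toNat → cs.getD t ' ' ≠ q) := by
  constructor
  · intro hneg t hst htl hq
    have h1 := (PySem.Chars.findFrom_natCast_eq_neg_one_iff cs [q] s hs).mp hneg
    apply h1
    rw [List.singleton_infix_iff]
    rw [List.mem_iff_getElem]
    refine ⟨t - s, by simp [List.length_drop]; omega, ?_⟩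
    have he : s + (t - s) = t := by omega
    simp [List.getD_eq_getElem?_getD, List.getElem?_eq_getElem htl] at hq
    simp [List.getElem_drop, he, hq]
  · intro hne
    obtain ⟨h1, h2, h3⟩ := PySem.Chars.findFrom_natCast_spec cs [q] s hs hne
    rw [pvSingletonPrefixDrop] at h2
    have hr : s ≤ (PySem.Chars.findFrom cs [q] (s : Int)).toNat := by omega
    refine ⟨hr, h2.1, h2.2, fun t hst htr => ?_⟩
    intro hq
    exact h3 t hst htr ((pvSingletonPrefixDrop cs q t).mpr ⟨by omega, hq⟩)

-- length of the maximal run of backslashes ending just below position m (clamped at lo)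
def pvRun (cs : List Char) (lo : Nat) : Nat → Nat
  | 0 => 0
  | m + 1 => if lo < m + 1 ∧ cs.getD m ' ' = '\\' then pvRun cs lo m + 1 else 0

-- first position ≥ j holding q behind an even backslash run ("the closing quote")
def pvFirst (cs : List Char) (q : Char) (lo j : Nat) : Option Nat :=
  if j < cs.length then
    if cs.getD j ' ' = q ∧ pvRun cs lo j % 2 = 0 then some j else pvFirst cs q lo (j + 1)
  else none
termination_by cs.length - j
decreasing_by omega

theorem pvRun_succ (cs : List Char) (lo m : Nat) :
    pvRun cs lo (m + 1) = if lo < m + 1 ∧ cs.getD m ' ' = '\\' then pvRun cs lo m + 1 else 0 := rfl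

theorem pvRun_self (cs : List Char) (lo : Nat) : pvRun cs lo lo = 0 := by
  cases lo with
  | zero => rfl
  | succ m => rw [pvRun_succ, if_neg (by omega)]

theorem pvBackB_le (cs : List Char) (i : Nat) : ∀ b, pvBackB cs i b ≤ b := by
  intro b
  induction b with
  | zero => simp [pvBackB]
  | succ b ih => rw [pvBackB]; split <;> omega

-- B's backward loop computes exactly the clamped backslash run
theorem pvBackB_run (cs : List Char) (i : Nat) :
    ∀ b, b - pvBackB cs i b = pvRun cs (i + 1) (b + 1) := by
  intro b
  induction b with
  | zero => rw [pvBackB, pvRun_succ, if_neg (by omega)]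
  | succ b ih =>
    rw [pvBackB, pvRun_succ]
    split
    · next hcond =>
      rw [if_pos ⟨by omega, hcond.2⟩, ← ih]
      have := pvBackB_le cs i b
      omega
    · next hcond =>
      rw [if_neg (by intro hx; exact hcond ⟨by omega, hx.2⟩)]
      omega

theorem pvFirst_step (cs : List Char) (q : Char) (lo a : Nat)
    (h : ¬(cs.getD a ' ' = q ∧ pvRun cs lo a % 2 = 0)) :
    pvFirst cs q lo a = pvFirst cs q lo (a + 1) := by
  rw [pvFirst]
  by_cases ha : a < cs.length
  · rw [if_pos ha, if_neg h]
  · rw [if_neg ha, pvFirst, if_neg (by omega)]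

theorem pvFirst_skip (cs : List Char) (q : Char) (lo : Nat) :
    ∀ d a, (∀ t, a ≤ t → t < a + d → cs.getD t ' ' ≠ q) →
      pvFirst cs q lo a = pvFirst cs q lo (a + d) := by
  intro d
  induction d with
  | zero => intro a _; rfl
  | succ d ih =>
    intro a hne
    rw [pvFirst_step cs q lo a (by intro hc; exact hne a (by omega) (by omega) hc.1)]
    rw [ih (a + 1) (fun t h1 h2 => hne t (by omega) (by omega))]
    congr 1
    omega

theorem pvFirst_none_ge (cs : List Char) (q : Char) (lo a : Nat) (ha : cs.length ≤ a) :
    pvFirst cs q lo a = none := by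
  rw [pvFirst, if_neg (by omega)]

-- A's escape-skipping scan lands exactly on the first even-run quote
theorem pvStrScanA_spec (cs : List Char) (q : Char) (lo : Nat) (hqb : q ≠ '\\') :
    ∀ fuel j, lo ≤ j → cs.length ≤ j + fuel → pvRun cs lo j % 2 = 0 →
      (∀ m, pvFirst cs q lo j = some m → pvStrScanA cs q fuel j = m) ∧
      (pvFirst cs q lo j = none → cs.length ≤ pvStrScanA cs q fuel j) := by
  intro fuel j
  fun_induction pvStrScanA cs q fuel j with
  | case1 j =>
    intro hlo hfuel hrun
    constructor
    · intro m hm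
      rw [pvFirst_none_ge cs q lo j (by omega)] at hm
      exact absurd hm (by simp)
    · intro _
      have he : pvStrScanA cs q 0 j = j := rfl
      omega
  | case2 fuel j hj hq =>
    intro hlo hfuel hrun
    have hgood : pvFirst cs q lo j = some j := by
      rw [pvFirst, if_pos hj, if_pos ⟨by simp [List.getElem?_eq_getElem hj, hq], hrun⟩]
    constructor
    · intro m hm; rw [hgood] at hm; exact (Option.some.injEq _ _).mp hm
    · intro hn; rw [hgood] at hn; exact absurd hn (by simp)
  | case3 fuel j hj hq hbs ih =>
    intro hlo hfuel hrun
    have hgj : cs.getD j ' ' = '\\' := by simp [List.getElem?_eq_getElem hj, hbs]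
    have h1 : pvFirst cs q lo j = pvFirst cs q lo (j + 1) :=
      pvFirst_step cs q lo j (by intro hc; exact hqb (by rw [← hc.1, hgj]))
    have hrun1 : pvRun cs lo (j + 1) = pvRun cs lo j + 1 := by
      rw [pvRun_succ, if_pos ⟨by omega, hgj⟩]
    have h2 : pvFirst cs q lo (j + 1) = pvFirst cs q lo (j + 2) := by
      apply pvFirst_step
      intro hc
      omega
    have hrun2 : pvRun cs lo (j + 2) % 2 = 0 := by
      rw [pvRun_succ]
      by_cases hb1 : cs.getD (j + 1) ' ' = '\\'
      · rw [if_pos ⟨by omega, hb1⟩, hrun1]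
        omega
      · rw [if_neg (by intro hc; exact hb1 hc.2)]
    have := ih (by omega) (by omega) hrun2
    rw [h1, h2]
    exact this
  | case4 fuel j hj hq hbs ih =>
    intro hlo hfuel hrun
    have hgj : cs.getD j ' ' = cs[j] := by simp [List.getElem?_eq_getElem hj]
    have h1 : pvFirst cs q lo j = pvFirst cs q lo (j + 1) :=
      pvFirst_step cs q lo j (by intro hc; exact hq (by rw [← hc.1, hgj]))
    have hrun1 : pvRun cs lo (j + 1) % 2 = 0 := by
      rw [pvRun_succ, if_neg (by intro hc; exact hbs (by rw [← hgj]; exact hc.2))]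
    have := ih (by omega) (by omega) hrun1
    rw [h1]
    exact this
  | case5 fuel j hj =>
    intro hlo hfuel hrun
    constructor
    · intro m hm
      rw [pvFirst_none_ge cs q lo j (by omega)] at hm
      exact absurd hm (by simp)
    · intro _
      have he : pvStrScanA cs q (fuel + 1) j = j := by rw [pvStrScanA, dif_neg hj]
      omega

-- B's find/parity loop computes the same closing position (+1) or len
theorem pvFindLoopB_spec (cs : List Char) (q : Char) (i : Nat) :
    ∀ fuel k, k < cs.length → cs.length ≤ k + fuel → i < k → cs.getD k ' ' = q →
      pvFindLoopB cs q i fuel k =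
        (match pvFirst cs q (i + 1) k with | some m => m + 1 | none => cs.length) := by
  intro fuel k
  fun_induction pvFindLoopB cs q i fuel k with
  | case1 k => omega
  | case2 fuel k hpar =>
    intro hk hfuel hik hq
    have hrun : pvRun cs (i + 1) k % 2 = 0 := by
      have hb := pvBackB_run cs i (k - 1)
      have hke : k - 1 + 1 = k := by omega
      rw [hke] at hb
      omega
    rw [pvFirst, if_pos hk, if_pos ⟨hq, hrun⟩]
  | case3 fuel k hpar hn =>
    intro hk hfuel hik hq
    have hrun : pvRun cs (i + 1) k % 2 ≠ 0 := by
      have hb := pvBackB_run cs i (k - 1)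
      have hke : k - 1 + 1 = k := by omega
      rw [hke] at hb
      omega
    have h1 : pvFirst cs q (i + 1) k = pvFirst cs q (i + 1) (k + 1) :=
      pvFirst_step cs q (i + 1) k (by intro hc; exact hrun hc.2)
    have hsp := (pvFindFromSpec cs q (k + 1) (by omega)).1
    rw [Nat.cast_add, Nat.cast_one] at hsp
    have h2 : pvFirst cs q (i + 1) (k + 1) = none := by
      rw [pvFirst_skip cs q (i + 1) (cs.length - (k + 1)) (k + 1)
            (fun t h1 h2 => hsp hn t h1 (by omega))]
      exact pvFirst_none_ge cs q (i + 1) _ (by omega)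
    rw [h1, h2]
  | case4 fuel k hpar hn ih =>
    intro hk hfuel hik hq
    have hrun : pvRun cs (i + 1) k % 2 ≠ 0 := by
      have hb := pvBackB_run cs i (k - 1)
      have hke : k - 1 + 1 = k := by omega
      rw [hke] at hb
      omega
    have hsp := (pvFindFromSpec cs q (k + 1) (by omega)).2
    rw [Nat.cast_add, Nat.cast_one] at hsp
    obtain ⟨hs1, hs2, hs3, hs4⟩ := hsp hn
    have h1 : pvFirst cs q (i + 1) k = pvFirst cs q (i + 1) (k + 1) :=
      pvFirst_step cs q (i + 1) k (by intro hc; exact hrun hc.2)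
    have h2 : pvFirst cs q (i + 1) (k + 1) =
        pvFirst cs q (i + 1) (PySem.Chars.findFrom cs [q] ((k : Int) + 1)).toNat := by
      have := pvFirst_skip cs q (i + 1)
        ((PySem.Chars.findFrom cs [q] ((k : Int) + 1)).toNat - (k + 1)) (k + 1)
        (fun t ht1 ht2 => hs4 t ht1 (by omega))
      rw [this]
      congr 1
      omega
    rw [h1, h2]
    exact ih hs2 (by omega) (by omega) hs3

-- _close_quote = first even-run closing quote + 1, or len when unterminated
theorem pvCloseQuoteB_spec (cs : List Char) (i : Nat) (hi : i < cs.length) :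
    pvCloseQuoteB cs i =
      (match pvFirst cs (cs.getD i ' ') (i + 1) (i + 1) with
        | some m => m + 1 | none => cs.length) := by
  unfold pvCloseQuoteB
  split
  · next hn =>
    have hsp := (pvFindFromSpec cs (cs.getD i ' ') (i + 1) (by omega)).1
    rw [Nat.cast_add, Nat.cast_one] at hsp
    have h2 : pvFirst cs (cs.getD i ' ') (i + 1) (i + 1) = none := by
      rw [pvFirst_skip cs (cs.getD i ' ') (i + 1) (cs.length - (i + 1)) (i + 1)
            (fun t h1 h2 => hsp hn t h1 (by omega))]
      exact pvFirst_none_ge cs (cs.getD i ' ') (i + 1) _ (by omega)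
    rw [h2]
  · next hn =>
    have hsp := (pvFindFromSpec cs (cs.getD i ' ') (i + 1) (by omega)).2
    rw [Nat.cast_add, Nat.cast_one] at hsp
    obtain ⟨hs1, hs2, hs3, hs4⟩ := hsp hn
    rw [pvFindLoopB_spec cs (cs.getD i ' ') i cs.length _ hs2 (by omega) (by omega) hs3]
    congr 1
    have := pvFirst_skip cs (cs.getD i ' ') (i + 1)
      ((PySem.Chars.findFrom cs [cs.getD i ' '] ((i : Int) + 1)).toNat - (i + 1)) (i + 1)
      (fun t ht1 ht2 => hs4 t ht1 (by omega))
    rw [this]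
    congr 1
    omega

theorem pvSlice_ge_len (cs : List Char) (i b : Nat) (hb : cs.length ≤ b) :
    pvSlice cs i b = cs.drop i := by
  unfold pvSlice
  rw [PySem.List.slice_toNat cs (by positivity) (by positivity)]
  simp only [Int.toNat_natCast]
  apply List.take_of_length_le
  simp [List.length_drop]
  omega

theorem pvLoopA_nil (cs : List Char) (fuel t : Nat) (ht : cs.length ≤ t) :
    pvLoopA cs fuel t = [] := by
  cases fuel with
  | zero => rfl
  | succ fuel => rw [pvLoopA, dif_neg (by omega)]

theorem pvLoopB_nil (cs : List Char) (fuel t : Nat) (ht : cs.length ≤ t) :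
    pvLoopB cs fuel t = [] := by
  cases fuel with
  | zero => rfl
  | succ fuel => rw [pvLoopB, dif_neg (by omega)]

theorem pvFindNl_eq (cs : List Char) (i : Nat) : pvFindNlA cs i = pvFindNlB cs i := by
  unfold pvFindNlA pvFindNlB
  by_cases hj : PySem.Chars.findFrom cs ['\n'] (i : Int) = -1 <;> simp [hj]

theorem pvMainLoop (cs : List Char) : ∀ fuel i, pvLoopA cs fuel i = pvLoopB cs fuel i := by
  intro fuel i
  fun_induction pvLoopA cs fuel i with
  | case1 i => rfl
  | case2 fuel i h hdq ih =>
    rw [pvLoopB, dif_pos h, if_pos (Or.inl hdq)]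
    have hgd : cs.getD i ' ' = cs[i] := by simp [List.getElem?_eq_getElem h]
    have hB := pvCloseQuoteB_spec cs i h
    rw [hgd, hdq] at hB
    have hspec := pvStrScanA_spec cs '"' (i + 1) (by decide) cs.length (i + 1) le_rfl
      (by omega) (by rw [pvRun_self])
    cases hF : pvFirst cs '"' (i + 1) (i + 1) with
    | some m =>
      have hA : pvStrScanA cs '"' cs.length (i + 1) = m := hspec.1 m hF
      rw [hF] at hB
      rw [hA] at ih
      simp only [hdq, hA, hB]
      rw [ih]
      simp
    | none =>
      have hA : cs.length ≤ pvStrScanA cs '"' cs.length (i + 1) := hspec.2 hF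
      rw [hF] at hB
      simp only [hdq, hB]
      rw [pvSlice_ge_len cs i _ (by omega), pvSlice_ge_len cs i _ le_rfl,
        pvLoopA_nil cs fuel _ (by omega), pvLoopB_nil cs fuel _ le_rfl]
      simp
  | case3 fuel i h hdq hsq ih =>
    rw [pvLoopB, dif_pos h, if_pos (Or.inr hsq)]
    have hgd : cs.getD i ' ' = cs[i] := by simp [List.getElem?_eq_getElem h]
    have hB := pvCloseQuoteB_spec cs i h
    rw [hgd, hsq] at hB
    have hspec := pvStrScanA_spec cs '\'' (i + 1) (by decide) cs.length (i + 1) le_rfl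
      (by omega) (by rw [pvRun_self])
    cases hF : pvFirst cs '\'' (i + 1) (i + 1) with
    | some m =>
      have hA : pvStrScanA cs '\'' cs.length (i + 1) = m := hspec.1 m hF
      rw [hF] at hB
      rw [hA] at ih
      simp only [hsq, hA, hB]
      rw [ih]
      simp
    | none =>
      have hA : cs.length ≤ pvStrScanA cs '\'' cs.length (i + 1) := hspec.2 hF
      rw [hF] at hB
      simp only [hsq, hB]
      rw [pvSlice_ge_len cs i _ (by omega), pvSlice_ge_len cs i _ le_rfl,
        pvLoopA_nil cs fuel _ (by omega), pvLoopB_nil cs fuel _ le_rfl]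
      simp
  | case4 fuel i h hdq hsq hc ih =>
    rw [pvLoopB, dif_pos h,
      if_neg (by rintro (hx | hx) <;> [exact hdq hx; exact hsq hx]), dif_pos hc]
    rw [pvFindNl_eq] at ih ⊢
    rw [ih]
  | case5 fuel i h hdq hsq hc hop ih =>
    rw [pvLoopB, dif_pos h,
      if_neg (by rintro (hx | hx) <;> [exact hdq hx; exact hsq hx]), dif_neg hc]
    rw [ih, hop]
    exact congrArg (fun t => t :: pvLoopB cs fuel (i + 1)) (by decide)
  | case6 fuel i h hdq hsq hc hop hcl ih =>
    rw [pvLoopB, dif_pos h,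
      if_neg (by rintro (hx | hx) <;> [exact hdq hx; exact hsq hx]), dif_neg hc]
    rw [ih, hcl]
    exact congrArg (fun t => t :: pvLoopB cs fuel (i + 1)) (by decide)
  | case7 fuel i h hdq hsq hc hop hcl hse ih =>
    rw [pvLoopB, dif_pos h,
      if_neg (by rintro (hx | hx) <;> [exact hdq hx; exact hsq hx]), dif_neg hc]
    rw [ih, hse]
    exact congrArg (fun t => t :: pvLoopB cs fuel (i + 1)) (by decide)
  | case8 fuel i h hdq hsq hc hop hcl hse hnl ih =>
    rw [pvLoopB, dif_pos h,
      if_neg (by rintro (hx | hx) <;> [exact hdq hx; exact hsq hx]), dif_neg hc]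
    rw [ih, hnl]
    exact congrArg (fun t => t :: pvLoopB cs fuel (i + 1)) (by decide)
  | case9 fuel i h hdq hsq hc hop hcl hse hnl ih =>
    rw [pvLoopB, dif_pos h,
      if_neg (by rintro (hx | hx) <;> [exact hdq hx; exact hsq hx]), dif_neg hc]
    rw [ih]
    congr 2
    rw [PySem.Dict.getD_eq_get?_getD]
    have hnone : (pvKindsB.get? cs[i]) = none := by
      unfold pvKindsB
      rw [PySem.Dict.get?_insert, if_neg hnl, PySem.Dict.get?_insert, if_neg hse,
        PySem.Dict.get?_insert, if_neg hcl, PySem.Dict.get?_insert, if_neg hop,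
        PySem.Dict.get?_empty]
    rw [hnone]
    rfl
  | case10 fuel i h =>
    rw [pvLoopB, dif_neg h]

-- ===== VERDICT (by name: the statement is the Claim_ definition above) =====
theorem tokenize_php_code_py_spec : Claim_equal_tokenize_php_code_py := by
  intro code _
  unfold Spec_tokenize_php_code_py tokenize_php_code_py tokenize_php_code_py_alt
  exact pvMainLoop code.toList code.toList.length 0
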